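-- pv_equiv track=rewrite | github.com/SergeyOberemok/python-storybook | libs/PythonStorybookLibs/Math/numbers.py | getTerms
-- ===== SOURCE A (Python) =====
-- def getTerms(number, maxBase = 10):
--     terms = []
--
--     for index, term in enumerate(range(number, 0, -1)):
--         if index == 0:
--             continue
--
--         if number == index + term and index <= term and term < maxBase:
--             terms.append((index, term))
--
--     return terms
-- ===== SOURCE B (Python) =====
-- def getTerms(number, maxBase = 10):
--     return [(i, number - i) for i in range(max(1, number - maxBase + 1), number // 2 + 1)]
-- ===== Notes on version B (the rewrite author's own statement) =====
-- stated objective: faster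
-- what changed: B replaces A's scan of the whole countdown range(number, 0, -1) (testing each index/term pair) by a closed-form computation of the qualifying index interval [max(1, number-maxBase+1), number//2] and emits the pairs directly.
import Mathlib
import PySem

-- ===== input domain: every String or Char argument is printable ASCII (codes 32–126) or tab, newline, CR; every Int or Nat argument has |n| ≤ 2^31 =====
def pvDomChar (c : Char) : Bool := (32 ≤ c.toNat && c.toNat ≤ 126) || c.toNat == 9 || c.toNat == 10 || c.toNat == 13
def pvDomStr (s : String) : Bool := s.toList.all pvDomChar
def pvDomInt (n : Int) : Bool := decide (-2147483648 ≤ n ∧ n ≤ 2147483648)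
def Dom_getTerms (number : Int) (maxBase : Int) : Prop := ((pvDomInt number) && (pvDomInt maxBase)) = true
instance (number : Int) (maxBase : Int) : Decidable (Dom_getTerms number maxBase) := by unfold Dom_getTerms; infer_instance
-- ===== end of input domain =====

-- B replaces A's scan over all of range(number, 0, -1) by a direct iteration over exactly
-- the qualifying indices [max(1, number-maxBase+1), number//2]; objective: faster (asymptotic).

-- ===== PORT A =====
def getTerms (number : Int) (maxBase : Int) : List (Int × Int) :=
  -- 'for index, term in enumerate(range(number, 0, -1))': the enumeration index is
  -- carried in the fold state (tail-recursive; exact for Python's enumerate)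
  ((PySem.List.pyRange number 0 (-1)).foldl
    (fun (st : Int × List (Int × Int)) term =>
      (st.1 + 1,
        if st.1 = 0 then st.2
        else
          if number = st.1 + term ∧ st.1 ≤ term ∧ term < maxBase then st.2 ++ [(st.1, term)]
          else st.2))
    (0, [])).2

-- ===== PORT B =====
def getTerms_alt (number : Int) (maxBase : Int) : List (Int × Int) :=
  (PySem.List.pyRange (max 1 (number - maxBase + 1)) (PySem.Int.floordiv number 2 + 1) 1).map
    (fun i => (i, number - i))

-- ===== PRECONDITION & SPEC =====
def Spec_getTerms (number : Int) (maxBase : Int) (out : List (Int × Int)) : Prop := out = getTerms_alt number maxBase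
instance (number : Int) (maxBase : Int) (out : List (Int × Int)) : Decidable (Spec_getTerms number maxBase out) := by unfold Spec_getTerms; infer_instance

-- ===== CLAIM (what is proved, stated in full; the proofs are below) =====
def Claim_equal_getTerms : Prop := ∀ (number : Int) (maxBase : Int), Dom_getTerms number maxBase → Spec_getTerms number maxBase (getTerms number maxBase)

-- ===== LEMMAS AND PROOFS =====

-- an index-carrying foldl is the foldl over the enumerated list.
theorem pv_foldl_enumerate {α β : Type} (g : β → Int × α → β) :
    ∀ (l : List α) (s : Int) (acc : β),
      (l.foldl (fun (st : Int × β) x => (st.1 + 1, g st.2 (st.1, x))) (s, acc)).2 =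
      (PySem.List.enumerate l s).foldl g acc := by
  intro l
  induction l with
  | nil => intro s acc; rfl
  | cons x xs ih =>
      intro s acc
      rw [List.foldl_cons, PySem.List.enumerate_cons, List.foldl_cons]
      exact ih (s + 1) (g acc (s, x))

-- enumerate distributes over append, shifting the start of the second part.
theorem pv_enumerate_append {α : Type} (xs ys : List α) (s : Int) :
    PySem.List.enumerate (xs ++ ys) s =
    PySem.List.enumerate xs s ++ PySem.List.enumerate ys (s + xs.length) := by
  induction xs generalizing s with
  | nil => simp [PySem.List.enumerate]
  | cons x xs ih =>
      simp [PySem.List.enumerate_cons, ih, List.length_cons]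
      ring_nf

-- enumerating a mapped Nat-range pairs each index with its image.
theorem pv_enumerate_map_range {α : Type} (f : Nat → α) (m : Nat) (s : Int) :
    PySem.List.enumerate ((List.range m).map f) s =
    (List.range m).map (fun (k : Nat) => (s + (k : Int), f k)) := by
  induction m with
  | zero => simp
  | succ m ih =>
      rw [List.range_succ, List.map_append, pv_enumerate_append, ih, List.map_append]
      simp [PySem.List.enumerate_cons]

-- A's enumerate of the countdown range lists exactly the pairs (k, number-k), k ∈ [0, number).
theorem pv_enumerate_countdown (n : Int) :
    PySem.List.enumerate (PySem.List.pyRange n 0 (-1)) =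
    (PySem.List.pyRange 0 n 1).map (fun k => (k, n - k)) := by
  rw [PySem.List.pyRange_neg_one, PySem.List.pyRange_one,
    pv_enumerate_map_range, List.map_map]
  simp only [sub_zero]
  refine List.map_congr_left ?_
  intro k _
  simp

-- filtering an Int range by an interval condition is the intersected range.
theorem pv_filter_pyRange_interval (lo hi : Int) :
    ∀ (m : Nat) (a b : Int), (b - a).toNat = m →
      (PySem.List.pyRange a b 1).filter (fun k => decide (lo ≤ k ∧ k < hi)) =
      PySem.List.pyRange (max a lo) (min b hi) 1 := by
  intro m
  induction m with
  | zero =>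
      intro a b hm
      rw [PySem.List.pyRange_one_eq_nil (by omega),
        PySem.List.pyRange_one_eq_nil (by omega)]
      rfl
  | succ m ih =>
      intro a b hm
      have hab : a < b := by omega
      rw [PySem.List.pyRange_one_cons hab, List.filter_cons]
      by_cases h : lo ≤ a ∧ a < hi
      · have h1 : max a lo = a := by omega
        have h2 : max (a + 1) lo = a + 1 := by omega
        have hd : (decide (lo ≤ a ∧ a < hi)) = true := by simp [h]
        rw [hd]
        simp only [if_pos]
        rw [ih (a + 1) b (by omega), h1, h2,
          show PySem.List.pyRange a (min b hi) 1 = a :: PySem.List.pyRange (a + 1) (min b hi) 1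
            from PySem.List.pyRange_one_cons (by omega)]
      · rcases not_and_or.mp h with h' | h'
        all_goals
          have hd : (decide (lo ≤ a ∧ a < hi)) = false := by simp [h]
          rw [hd]
          simp only [Bool.false_eq_true, if_false]
          rw [ih (a + 1) b (by omega)]
        · congr 1
          omega
        · rw [PySem.List.pyRange_one_eq_nil (by omega),
            PySem.List.pyRange_one_eq_nil (by omega)]

theorem getTerms_spec_aux (number maxBase : Int) :
    getTerms number maxBase = getTerms_alt number maxBase := by
  have h0 : getTerms number maxBase =
      (PySem.List.enumerate (PySem.List.pyRange number 0 (-1))).foldl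
        (fun terms p =>
          if p.1 = 0 then terms
          else
            if number = p.1 + p.2 ∧ p.1 ≤ p.2 ∧ p.2 < maxBase then terms ++ [(p.1, p.2)]
            else terms)
        [] := by
    unfold getTerms
    exact pv_foldl_enumerate
      (fun terms (p : Int × Int) =>
        if p.1 = 0 then terms
        else
          if number = p.1 + p.2 ∧ p.1 ≤ p.2 ∧ p.2 < maxBase then terms ++ [(p.1, p.2)]
          else terms)
      (PySem.List.pyRange number 0 (-1)) 0 []
  rw [h0]
  unfold getTerms_alt
  -- merge A's nested branches into a single guarded append
  have hfun : (fun (terms : List (Int × Int)) (p : Int × Int) =>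
      if p.1 = 0 then terms
      else
        if number = p.1 + p.2 ∧ p.1 ≤ p.2 ∧ p.2 < maxBase then terms ++ [(p.1, p.2)]
        else terms) =
      (fun terms p =>
        if (fun (q : Int × Int) =>
              decide (¬ q.1 = 0 ∧ number = q.1 + q.2 ∧ q.1 ≤ q.2 ∧ q.2 < maxBase)) p then
          terms ++ [(fun (q : Int × Int) => (q.1, q.2)) p]
        else terms) := by
    funext terms p
    by_cases h0 : p.1 = 0
    · simp [h0]
    · by_cases hc : number = p.1 + p.2 ∧ p.1 ≤ p.2 ∧ p.2 < maxBase
      · simp [h0, hc]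
      · simp [h0, hc]
  rw [hfun, PySem.List.foldl_append_if, pv_enumerate_countdown, List.filter_map]
  set lo := max 1 (number - maxBase + 1) with hlo
  set hi := PySem.Int.floordiv number 2 + 1 with hhi
  -- the filter condition, on k ∈ range, is the interval [lo, hi)
  have hcong : (PySem.List.pyRange 0 number 1).filter
        ((fun (q : Int × Int) =>
            decide (¬ q.1 = 0 ∧ number = q.1 + q.2 ∧ q.1 ≤ q.2 ∧ q.2 < maxBase)) ∘
          (fun k => (k, number - k))) =
      (PySem.List.pyRange 0 number 1).filter (fun k => decide (lo ≤ k ∧ k < hi)) := by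
    apply List.filter_congr
    intro k hk
    have hmem : 0 ≤ k ∧ k < number := (PySem.List.mem_pyRange_one).1 hk
    have h2 : k ≤ PySem.Int.floordiv number 2 ↔ k * 2 ≤ number :=
      PySem.Int.le_floordiv_iff_mul_le (by omega)
    simp only [Function.comp, decide_eq_decide]
    constructor
    · rintro ⟨h0, -, hle, hub⟩
      exact ⟨by omega, by omega⟩
    · rintro ⟨hl, hr⟩
      refine ⟨by omega, by omega, by omega, by omega⟩
  rw [hcong, pv_filter_pyRange_interval lo hi (number - 0).toNat 0 number rfl]
  have hmax : max 0 lo = lo := by omega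
  rw [hmax]
  by_cases hn : 1 ≤ number
  · have : PySem.Int.floordiv number 2 < number :=
      (PySem.Int.floordiv_lt_iff_lt_mul (by omega)).2 (by omega)
    have hmin : min number hi = hi := by omega
    rw [hmin]
    ext i j
    simp [Prod.mk.eta]
  · have h1 : PySem.Int.floordiv number 2 < 1 :=
      (PySem.Int.floordiv_lt_iff_lt_mul (by omega)).2 (by omega)
    rw [PySem.List.pyRange_one_eq_nil (by omega),
      PySem.List.pyRange_one_eq_nil (by omega)]
    rfl

-- ===== VERDICT (by name: the statement is the Claim_ definition above) =====
theorem getTerms_spec : Claim_equal_getTerms := by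
  intro number maxBase _
  exact getTerms_spec_aux number maxBase
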